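-- pv_equiv track=rewrite | github.com/AlyssaMalinoff/advent-of-code | 2023/day-3-gear-ratios/main.py | get_coordinate_set
-- ===== SOURCE A (Python) =====
-- def get_coordinate_set(grid):
--     coordinate_set = set()
--
--     for r, row in enumerate(grid):
--         for c, char in enumerate(row):
--             if char.isdigit() or char == ".":
--                 continue
--             for dr in range(r - 1, r + 2):
--                 for dc in range(c - 1, c + 2):
--                     # checking for out of bounds
--                     if (
--                         dr < 0
--                         or dr >= len(grid)
--                         or dc < 0
--                         or dc >= len(grid[dr])
--                         or not grid[dr][dc].isdigit()
--                     ):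
--                         continue
--                     while dc > 0 and grid[dr][dc - 1].isdigit():
--                         dc -= 1
--                     coordinate_set.add((dr, dc))
--
--     return coordinate_set
-- ===== SOURCE B (Python) =====
-- def get_coordinate_set(grid):
--     # Pass 1: for every cell, precompute the start column of the digit run
--     # containing it (None for non-digit cells), one left-to-right sweep per row.
--     starts = []
--     for row in grid:
--         srow = []
--         run = None
--         for c, ch in enumerate(row):
--             if ch.isdigit():
--                 if run is None:
--                     run = c
--                 srow.append(run)
--             else:
--                 srow.append(None)
--                 run = None
--         starts.append(srow)
--
--     # Pass 2: for every symbol cell, look up its 3x3 neighbourhood in the table.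
--     result = set()
--     for r, row in enumerate(grid):
--         for c, ch in enumerate(row):
--             if ch.isdigit() or ch == ".":
--                 continue
--             for dr in (r - 1, r, r + 1):
--                 if 0 <= dr < len(starts):
--                     srow = starts[dr]
--                     for dc in (c - 1, c, c + 1):
--                         if 0 <= dc < len(srow) and srow[dc] is not None:
--                             result.add((dr, srow[dc]))
--     return result
-- ===== Notes on version B (the rewrite author's own statement) =====
-- stated objective: faster
-- what changed: B precomputes, in one left-to-right sweep per row, a table mapping each cell to the start column of the digit run containing it, so A's per-neighbour while-loop that walks left to a number's start disappears and each 3x3 neighbour becomes a single table lookup.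
import Mathlib
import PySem

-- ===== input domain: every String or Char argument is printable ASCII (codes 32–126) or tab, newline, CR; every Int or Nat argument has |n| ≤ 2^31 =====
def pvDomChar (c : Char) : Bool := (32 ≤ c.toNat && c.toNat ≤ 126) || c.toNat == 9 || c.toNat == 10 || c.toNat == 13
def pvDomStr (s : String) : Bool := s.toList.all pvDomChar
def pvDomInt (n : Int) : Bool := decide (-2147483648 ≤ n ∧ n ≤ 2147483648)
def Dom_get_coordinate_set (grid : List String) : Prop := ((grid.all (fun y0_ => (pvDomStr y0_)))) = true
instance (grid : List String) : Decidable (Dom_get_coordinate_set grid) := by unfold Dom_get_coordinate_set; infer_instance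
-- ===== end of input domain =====

-- B replaces A's per-neighbour while-loop walk to a number's start by a run-start
-- table precomputed in one sweep per row (objective: alternative decomposition).

-- ===== PORT A =====
-- char.isdigit() / char == "." on a one-char string; exact on the printable-ASCII domain
def pvIsDigit (ch : Char) : Bool := ch.isDigit

-- the 'while dc > 0 and grid[dr][dc - 1].isdigit(): dc -= 1' loop of A
-- (the read is in range whenever the loop tests: dc > 0 and dc - 1 < len(row), so getD is exact)
def pvWalkLeft (row : List Char) : Nat → Nat
  | 0 => 0
  | d + 1 => if pvIsDigit (row.getD d ' ') then pvWalkLeft row d else d + 1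

def get_coordinate_set (grid : List String) : List (Int × Int) :=
  let g := grid.map String.toList
  (PySem.List.enumerate g 0).foldl (fun cs p =>
    (PySem.List.enumerate p.2 0).foldl (fun cs q =>
      if pvIsDigit q.2 || q.2 == '.' then cs
      else
        (PySem.List.pyRange (p.1 - 1) (p.1 + 2) 1).foldl (fun cs dr =>
          (PySem.List.pyRange (q.1 - 1) (q.1 + 2) 1).foldl (fun cs dc =>
            if dr < 0 ∨ dr ≥ PySem.List.len g ∨ dc < 0 ∨
               dc ≥ PySem.List.len (PySem.List.pyGetD g dr []) ∨
               ¬ pvIsDigit (PySem.List.pyGetD (PySem.List.pyGetD g dr []) dc ' ')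
            then cs
            else PySem.Set.add cs (dr, (pvWalkLeft (PySem.List.pyGetD g dr []) dc.toNat : Int)))
            cs)
          cs)
      cs)
    PySem.Set.empty

-- ===== PORT B =====
-- one left-to-right sweep of a row: start column of the digit run containing each cell
def pvRowStartsGo : List Char → Nat → Option Nat → List (Option Nat)
  | [], _, _ => []
  | ch :: rs, c, run =>
    if pvIsDigit ch then
      some (run.getD c) :: pvRowStartsGo rs (c + 1) (some (run.getD c))
    else
      none :: pvRowStartsGo rs (c + 1) none

def pvRowStarts (row : List Char) : List (Option Nat) := pvRowStartsGo row 0 none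

def get_coordinate_set_alt (grid : List String) : List (Int × Int) :=
  let g := grid.map String.toList
  let starts := g.map pvRowStarts
  (PySem.List.enumerate g 0).foldl (fun cs p =>
    (PySem.List.enumerate p.2 0).foldl (fun cs q =>
      if pvIsDigit q.2 || q.2 == '.' then cs
      else
        ([p.1 - 1, p.1, p.1 + 1] : List Int).foldl (fun cs dr =>
          if 0 ≤ dr ∧ dr < (starts.length : Int) then
            ([q.1 - 1, q.1, q.1 + 1] : List Int).foldl (fun cs dc =>
              if 0 ≤ dc ∧ dc < ((PySem.List.pyGetD starts dr []).length : Int) then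
                match PySem.List.pyGetD (PySem.List.pyGetD starts dr []) dc none with
                | some st => PySem.Set.add cs (dr, (st : Int))
                | none => cs
              else cs)
              cs
          else cs)
          cs)
      cs)
    PySem.Set.empty

-- ===== PRECONDITION & SPEC =====
def Spec_get_coordinate_set (grid : List String) (out : List (Int × Int)) : Prop := out = get_coordinate_set_alt grid
instance (grid : List String) (out : List (Int × Int)) : Decidable (Spec_get_coordinate_set grid out) := by unfold Spec_get_coordinate_set; infer_instance

-- ===== CLAIM (what is proved, stated in full; the proofs are below) =====
def Claim_equal_get_coordinate_set : Prop := ∀ (grid : List String), Dom_get_coordinate_set grid → Spec_get_coordinate_set grid (get_coordinate_set grid)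

-- ===== LEMMAS AND PROOFS =====

theorem pvRowStartsGo_length (suf : List Char) (c : Nat) (run : Option Nat) :
    (pvRowStartsGo suf c run).length = suf.length := by
  induction suf generalizing c run with
  | nil => rfl
  | cons ch rs ih => simp only [pvRowStartsGo]; split <;> simp [ih]

theorem pvRowStarts_length (row : List Char) : (pvRowStarts row).length = row.length :=
  pvRowStartsGo_length row 0 none

-- the sweep's invariant: 'run.getD c' is exactly where A's left walk from column c lands
theorem pvRowStartsGo_getElem? (row : List Char) (suf : List Char) (c : Nat) (run : Option Nat)
    (hsuf : suf = row.drop c) (hrun : run.getD c = pvWalkLeft row c) (i : Nat)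
    (hi : i < suf.length) :
    (pvRowStartsGo suf c run)[i]? =
      some (if h : c + i < row.length then
              (if pvIsDigit (row[c + i]'h) then some (pvWalkLeft row (c + i)) else none)
            else none) := by
  induction suf generalizing c run i with
  | nil => simp at hi
  | cons ch rs ih =>
    have hc : c < row.length := by
      have := congrArg List.length hsuf
      simp at this
      omega
    have hch : row[c] = ch := by
      have h0 : (row.drop c)[0]? = some ch := by rw [← hsuf]; rfl
      rw [List.getElem?_drop] at h0
      simpa [List.getElem?_eq_getElem hc] using h0
    have hrs : rs = row.drop (c + 1) := by
      have h1 : (row.drop c).tail = row.drop (c + 1) := List.tail_drop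
      rw [← hsuf] at h1
      simpa using h1
    have hrowd : row.getD c ' ' = row[c] := by
      simp [List.getD, List.getElem?_eq_getElem hc]
    have hwstep : pvWalkLeft row (c + 1) = if pvIsDigit row[c] then pvWalkLeft row c else c + 1 := by
      show (if pvIsDigit (row.getD c ' ') then pvWalkLeft row c else c + 1) = _
      rw [hrowd]
    cases i with
    | zero =>
      by_cases hd : pvIsDigit ch
      · simp [pvRowStartsGo, hd, hc, hch, hrun]
      · simp [pvRowStartsGo, hd, hc, hch]
    | succ j =>
      have hj : j < rs.length := by simpa using hi
      by_cases hd : pvIsDigit ch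
      · have hnext : (some (run.getD c)).getD (c + 1) = pvWalkLeft row (c + 1) := by
          rw [hwstep, hch, hd, if_pos rfl]
          exact hrun
        have := ih (c + 1) (some (run.getD c)) hrs hnext j hj
        simp only [pvRowStartsGo, hd, if_true, List.getElem?_cons_succ]
        rw [this]
        congr 1
        rw [show c + 1 + j = c + (j + 1) by omega]
      · have hnext : (none : Option Nat).getD (c + 1) = pvWalkLeft row (c + 1) := by
          rw [hwstep, hch]
          simp [hd]
        have := ih (c + 1) none hrs hnext j hj
        simp only [pvRowStartsGo, hd, Bool.false_eq_true, if_false, List.getElem?_cons_succ]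
        rw [this]
        congr 1
        rw [show c + 1 + j = c + (j + 1) by omega]

theorem pvRowStarts_getElem? (row : List Char) (i : Nat) (h : i < row.length) :
    (pvRowStarts row)[i]? =
      some (if pvIsDigit (row[i]'h) then some (pvWalkLeft row i) else none) := by
  have := pvRowStartsGo_getElem? row row 0 none rfl rfl i h
  simpa [h] using this

-- the 3×3 ranges of A are the explicit three-element lists of B
theorem pvRange3 (a : Int) : PySem.List.pyRange (a - 1) (a + 2) 1 = [a - 1, a, a + 1] := by
  rw [PySem.List.pyRange_one_cons (by omega), PySem.List.pyRange_one_cons (by omega),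
      PySem.List.pyRange_one_cons (by omega), PySem.List.pyRange_one_eq_nil (by omega)]
  norm_num

-- one neighbour cell: A's guarded walk equals B's table lookup (dr known in bounds)
theorem pvCell_eq (g : List (List Char)) (dr dc : Int) (cs : List (Int × Int))
    (hdr0 : 0 ≤ dr) (hdrl : dr < (g.length : Int)) :
    (if dr < 0 ∨ dr ≥ PySem.List.len g ∨ dc < 0 ∨
        dc ≥ PySem.List.len (PySem.List.pyGetD g dr []) ∨
        ¬ pvIsDigit (PySem.List.pyGetD (PySem.List.pyGetD g dr []) dc ' ')
     then cs
     else PySem.Set.add cs (dr, (pvWalkLeft (PySem.List.pyGetD g dr []) dc.toNat : Int))) =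
    (if 0 ≤ dc ∧ dc < ((pvRowStarts (PySem.List.pyGetD g dr [])).length : Int) then
        match PySem.List.pyGetD (pvRowStarts (PySem.List.pyGetD g dr [])) dc none with
        | some st => PySem.Set.add cs (dr, (st : Int))
        | none => cs
      else cs) := by
  set row := PySem.List.pyGetD g dr [] with hrow
  rw [pvRowStarts_length]
  by_cases hdc : 0 ≤ dc ∧ dc < (row.length : Int)
  · obtain ⟨h0, hl⟩ := hdc
    obtain ⟨n, rfl⟩ : ∃ n : Nat, dc = (n : Int) := ⟨dc.toNat, (Int.toNat_of_nonneg h0).symm⟩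
    have hn : n < row.length := by exact_mod_cast hl
    have hrowd : PySem.List.pyGetD row (n : Int) ' ' = row[n] := by
      simp [List.getD, List.getElem?_eq_getElem hn]
    have hsd : PySem.List.pyGetD (pvRowStarts row) (n : Int) none =
        if pvIsDigit row[n] then some (pvWalkLeft row n) else none := by
      simp [List.getD, pvRowStarts_getElem? row n hn]
    by_cases hd : pvIsDigit row[n]
    · have hg : ¬ (dr < 0 ∨ dr ≥ PySem.List.len g ∨ (n : Int) < 0 ∨
          (n : Int) ≥ PySem.List.len row ∨
          ¬ pvIsDigit (PySem.List.pyGetD row (n : Int) ' ') = true) := by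
        simp only [PySem.List.len_eq]
        intro h
        rcases h with h | h | h | h | h
        · omega
        · omega
        · omega
        · omega
        · rw [hrowd] at h; exact h hd
      rw [if_neg hg, if_pos ⟨by omega, hl⟩, hsd, if_pos hd]
      simp
    · have hg : dr < 0 ∨ dr ≥ PySem.List.len g ∨ (n : Int) < 0 ∨
          (n : Int) ≥ PySem.List.len row ∨
          ¬ pvIsDigit (PySem.List.pyGetD row (n : Int) ' ') = true := by
        refine Or.inr (Or.inr (Or.inr (Or.inr ?_)))
        rw [hrowd]; exact hd
      rw [if_pos hg, if_pos ⟨by omega, hl⟩, hsd, if_neg hd]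
  · have hg : dr < 0 ∨ dr ≥ PySem.List.len g ∨ dc < 0 ∨
        dc ≥ PySem.List.len row ∨
        ¬ pvIsDigit (PySem.List.pyGetD row dc ' ') = true := by
      simp only [PySem.List.len_eq]
      rcases not_and_or.mp hdc with h | h
      · exact Or.inr (Or.inr (Or.inl (by omega)))
      · exact Or.inr (Or.inr (Or.inr (Or.inl (by omega))))
    rw [if_pos hg, if_neg hdc]

-- one neighbour row: A's guarded dc-scan equals B's bounds-hoisted dc-scan
theorem pvRow_eq (g : List (List Char)) (dr c : Int) (cs : List (Int × Int)) :
    (PySem.List.pyRange (c - 1) (c + 2) 1).foldl (fun cs dc =>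
        if dr < 0 ∨ dr ≥ PySem.List.len g ∨ dc < 0 ∨
           dc ≥ PySem.List.len (PySem.List.pyGetD g dr []) ∨
           ¬ pvIsDigit (PySem.List.pyGetD (PySem.List.pyGetD g dr []) dc ' ')
        then cs
        else PySem.Set.add cs (dr, (pvWalkLeft (PySem.List.pyGetD g dr []) dc.toNat : Int))) cs =
    (if 0 ≤ dr ∧ dr < ((g.map pvRowStarts).length : Int) then
        ([c - 1, c, c + 1] : List Int).foldl (fun cs dc =>
          if 0 ≤ dc ∧ dc < ((PySem.List.pyGetD (g.map pvRowStarts) dr []).length : Int) then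
            match PySem.List.pyGetD (PySem.List.pyGetD (g.map pvRowStarts) dr []) dc none with
            | some st => PySem.Set.add cs (dr, (st : Int))
            | none => cs
          else cs) cs
      else cs) := by
  rw [pvRange3]
  by_cases hdr : 0 ≤ dr ∧ dr < (g.length : Int)
  · obtain ⟨h0, hl⟩ := hdr
    have hmap : PySem.List.pyGetD (g.map pvRowStarts) dr [] =
        pvRowStarts (PySem.List.pyGetD g dr []) := by
      obtain ⟨n, rfl⟩ : ∃ n : Nat, dr = (n : Int) := ⟨dr.toNat, (Int.toNat_of_nonneg h0).symm⟩
      have hn : n < g.length := by exact_mod_cast hl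
      simp [List.getD, hn]
    have hside : 0 ≤ dr ∧ dr < ((g.map pvRowStarts).length : Int) := by simpa using ⟨h0, hl⟩
    rw [if_pos hside]
    simp only [List.foldl, hmap]
    rw [pvCell_eq g dr (c - 1) cs h0 hl, pvCell_eq g dr c _ h0 hl, pvCell_eq g dr (c + 1) _ h0 hl]
  · have hside : ¬ (0 ≤ dr ∧ dr < ((g.map pvRowStarts).length : Int)) := by simpa using hdr
    rw [if_neg hside]
    have hguard : ∀ dc : Int, (dr < 0 ∨ dr ≥ PySem.List.len g ∨ dc < 0 ∨
        dc ≥ PySem.List.len (PySem.List.pyGetD g dr []) ∨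
        ¬ pvIsDigit (PySem.List.pyGetD (PySem.List.pyGetD g dr []) dc ' ') = true) := by
      intro dc
      simp only [PySem.List.len_eq]
      rcases not_and_or.mp hdr with h | h
      · exact Or.inl (by omega)
      · exact Or.inr (Or.inl (by omega))
    simp only [List.foldl, hguard, if_true]

-- one symbol cell: A's 3×3 double range equals B's explicit-list scan
theorem pvSym_eq (g : List (List Char)) (r c : Int) (cs : List (Int × Int)) :
    (PySem.List.pyRange (r - 1) (r + 2) 1).foldl (fun cs dr =>
        (PySem.List.pyRange (c - 1) (c + 2) 1).foldl (fun cs dc =>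
          if dr < 0 ∨ dr ≥ PySem.List.len g ∨ dc < 0 ∨
             dc ≥ PySem.List.len (PySem.List.pyGetD g dr []) ∨
             ¬ pvIsDigit (PySem.List.pyGetD (PySem.List.pyGetD g dr []) dc ' ')
          then cs
          else PySem.Set.add cs (dr, (pvWalkLeft (PySem.List.pyGetD g dr []) dc.toNat : Int))) cs) cs =
    ([r - 1, r, r + 1] : List Int).foldl (fun cs dr =>
        if 0 ≤ dr ∧ dr < ((g.map pvRowStarts).length : Int) then
          ([c - 1, c, c + 1] : List Int).foldl (fun cs dc =>
            if 0 ≤ dc ∧ dc < ((PySem.List.pyGetD (g.map pvRowStarts) dr []).length : Int) then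
              match PySem.List.pyGetD (PySem.List.pyGetD (g.map pvRowStarts) dr []) dc none with
              | some st => PySem.Set.add cs (dr, (st : Int))
              | none => cs
            else cs) cs
        else cs) cs := by
  rw [show PySem.List.pyRange (r - 1) (r + 2) 1 = [r - 1, r, r + 1] from pvRange3 r]
  apply List.foldl_ext
  intro cs' dr _
  exact pvRow_eq g dr c cs'

-- ===== VERDICT (by name: the statement is the Claim_ definition above) =====
theorem get_coordinate_set_spec : Claim_equal_get_coordinate_set := by
  intro grid _
  show get_coordinate_set grid = get_coordinate_set_alt grid
  unfold get_coordinate_set get_coordinate_set_alt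
  apply List.foldl_ext
  intro cs p _
  apply List.foldl_ext
  intro cs q _
  by_cases hskip : (pvIsDigit q.2 || q.2 == '.') = true
  · simp only [hskip, if_true]
  · simp only [hskip, Bool.false_eq_true, if_false]
    exact pvSym_eq (grid.map String.toList) p.1 q.1 cs
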